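-- pv_equiv track=rewrite | github.com/copyleftdev/x12-python | x12/codes/validators.py | validate_npi
-- ===== SOURCE A (Python) =====
-- def validate_npi(npi: str) -> bool:
--     """Validate NPI (National Provider Identifier).
--
--     NPI must be 10 digits and pass Luhn check with 80840 prefix.
--
--     Args:
--         npi: NPI string to validate.
--
--     Returns:
--         True if valid, False otherwise.
--     """
--     # Must be 10 digits
--     if not npi or len(npi) != 10 or not npi.isdigit():
--         return False
--
--     # Luhn check with 80840 prefix
--     # Prepend 80840 to make 15 digits, then apply Luhn
--     full_number = "80840" + npi
--
--     total = 0
--     for i, digit in enumerate(reversed(full_number)):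
--         d = int(digit)
--         if i % 2 == 1:
--             d *= 2
--             if d > 9:
--                 d -= 9
--         total += d
--
--     return total % 10 == 0
-- ===== SOURCE B (Python) =====
-- def validate_npi(npi: str) -> bool:
--     """Validate NPI (National Provider Identifier).
--
--     Same guard as A; the Luhn pass is done as two straight slice sums
--     (non-doubled positions, and doubled positions via a lookup table)
--     instead of a reversed parity-branched loop.
--     """
--     if not npi or len(npi) != 10 or not npi.isdigit():
--         return False
--     full = "80840" + npi
--     T = [0, 2, 4, 6, 8, 1, 3, 5, 7, 9]
--     s1 = sum(int(c) for c in full[0::2])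
--     s2 = sum(T[int(c)] for c in full[1::2])
--     return (s1 + s2) % 10 == 0
-- ===== Notes on version B (the rewrite author's own statement) =====
-- stated objective: alternative
-- what changed: Replaced the single reversed enumerate loop with its i%2 branch and conditional -9 adjustment by two straight sums over the even- and odd-position slices of the prefixed number, with the doubling folded into a precomputed 10-entry lookup table.
import Mathlib
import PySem

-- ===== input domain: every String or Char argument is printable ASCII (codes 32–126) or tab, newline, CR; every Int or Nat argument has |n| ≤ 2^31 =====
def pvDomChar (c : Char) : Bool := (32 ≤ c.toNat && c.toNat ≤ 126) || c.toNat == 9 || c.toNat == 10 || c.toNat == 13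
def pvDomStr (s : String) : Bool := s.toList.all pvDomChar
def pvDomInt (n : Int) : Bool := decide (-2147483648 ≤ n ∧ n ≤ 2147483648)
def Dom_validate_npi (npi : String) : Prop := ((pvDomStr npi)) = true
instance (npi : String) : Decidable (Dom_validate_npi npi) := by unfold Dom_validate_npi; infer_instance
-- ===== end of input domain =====

-- B replaces A's reversed parity-branched Luhn loop by two straight sums over the
-- even/odd position slices with a doubled-digit lookup table (objective: alternative).

-- int(digit) for a single digit character; exact under the isdigit guard
def pvDigitVal (c : Char) : Int := (c.toNat : Int) - 48

-- ===== PORT A =====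
-- `for i, digit in enumerate(reversed(full_number))`: structural recursion over the
-- reversed char list, carrying the enumerate counter i and the running total.
def pvLuhnLoop : List Char → Nat → Int → Int
  | [], _, total => total
  | c :: rest, i, total =>
    let d := pvDigitVal c
    let d := if i % 2 == 1 then (let d2 := d * 2; if d2 > 9 then d2 - 9 else d2) else d
    pvLuhnLoop rest (i + 1) (total + d)

def validate_npi (npi : String) : Bool :=
  if npi.toList.isEmpty || npi.toList.length != 10 || !(PySem.Chars.strIsdigit npi.toList) then
    false
  else
    let full : List Char := ['8', '0', '8', '4', '0'] ++ npi.toList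
    let total := pvLuhnLoop full.reverse 0 0
    PySem.Int.mod total 10 == 0

-- ===== PORT B =====
-- full[0::2] (every second element), ported by hand; exact for step-2 slices from 0
def pvEveryOther {α : Type} : List α → List α
  | [] => []
  | [a] => [a]
  | a :: _ :: rest => a :: pvEveryOther rest

def pvT : List Int := [0, 2, 4, 6, 8, 1, 3, 5, 7, 9]

def validate_npi_alt (npi : String) : Bool :=
  if npi.toList.isEmpty || npi.toList.length != 10 || !(PySem.Chars.strIsdigit npi.toList) then
    false
  else
    let full : List Char := ['8', '0', '8', '4', '0'] ++ npi.toList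
    let s1 := ((pvEveryOther full).map pvDigitVal).sum
    -- T[int(c)]: the index is always 0..9 under the guard, so the lookup succeeds
    let s2 := ((pvEveryOther full.tail).map
        (fun c => (PySem.List.pyGet? pvT (pvDigitVal c)).getD 0)).sum
    PySem.Int.mod (s1 + s2) 10 == 0

-- ===== PRECONDITION & SPEC =====
def Spec_validate_npi (npi : String) (out : Bool) : Prop := out = validate_npi_alt npi
instance (npi : String) (out : Bool) : Decidable (Spec_validate_npi npi out) := by unfold Spec_validate_npi; infer_instance

-- ===== CLAIM (what is proved, stated in full; the proofs are below) =====
def Claim_equal_validate_npi : Prop := ∀ (npi : String), Dom_validate_npi npi → Spec_validate_npi npi (validate_npi npi)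

-- ===== LEMMAS AND PROOFS =====

-- A's loop body as a function of the enumerate index
def pvStep (i : Nat) (c : Char) : Int :=
  if i % 2 == 1 then (let d2 := pvDigitVal c * 2; if d2 > 9 then d2 - 9 else d2)
  else pvDigitVal c

theorem pvLuhnLoop_append_singleton (xs : List Char) (c : Char) (i : Nat) (t : Int) :
    pvLuhnLoop (xs ++ [c]) i t = pvLuhnLoop xs i t + pvStep (i + xs.length) c := by
  induction xs generalizing i t with
  | nil => simp [pvLuhnLoop, pvStep]
  | cons a rest ih =>
    simp only [List.cons_append, pvLuhnLoop, ih, List.length_cons]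
    congr 2
    omega

theorem pvLookup_eq_double (c : Char) (h : PySem.Chars.isdigit c = true) :
    (PySem.List.pyGet? pvT (pvDigitVal c)).getD 0
      = (let d2 := pvDigitVal c * 2; if d2 > 9 then d2 - 9 else d2) := by
  have hb : 48 ≤ c.toNat ∧ c.toNat ≤ 57 := by
    simp only [PySem.Chars.isdigit, Bool.and_eq_true, decide_eq_true_eq, Char.le_def] at h
    have h1 := h.1; have h2 := h.2
    constructor <;> [exact h1; exact h2]
  have hd : 0 ≤ pvDigitVal c ∧ pvDigitVal c ≤ 9 := by unfold pvDigitVal; omega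
  have key : ∀ d : Int, 0 ≤ d → d ≤ 9 →
      (PySem.List.pyGet? pvT d).getD 0 = (if d * 2 > 9 then d * 2 - 9 else d * 2) := by
    intro d h0 h9
    interval_cases d <;> decide
  simpa using key _ hd.1 hd.2

-- main lemma: on an odd-length list of digit chars, A's reversed parity loop equals
-- B's two straight position sums
theorem pvMain (n : Nat) (l : List Char) (hlen : l.length = 2 * n + 1)
    (hdig : ∀ c ∈ l, PySem.Chars.isdigit c = true) :
    pvLuhnLoop l.reverse 0 0
      = ((pvEveryOther l).map pvDigitVal).sum
        + ((pvEveryOther l.tail).map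
            (fun c => (PySem.List.pyGet? pvT (pvDigitVal c)).getD 0)).sum := by
  induction n generalizing l with
  | zero =>
    match l, hlen with
    | [c], _ => simp [pvLuhnLoop, pvEveryOther]
  | succ n ih =>
    match l, hlen with
    | a :: b :: rest, hlen =>
      have hrest : rest.length = 2 * n + 1 := by simp at hlen; omega
      have hda : PySem.Chars.isdigit a = true := hdig a (by simp)
      have hdb : PySem.Chars.isdigit b = true := hdig b (by simp)
      have hdr : ∀ c ∈ rest, PySem.Chars.isdigit c = true := by
        intro c hc; exact hdig c (by simp [hc])
      have hrev : (a :: b :: rest).reverse = (rest.reverse ++ [b]) ++ [a] := by simp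
      rw [hrev, pvLuhnLoop_append_singleton, pvLuhnLoop_append_singleton]
      have hlr : rest.reverse.length = 2 * n + 1 := by simp [hrest]
      have hsb : pvStep (0 + rest.reverse.length) b
          = (PySem.List.pyGet? pvT (pvDigitVal b)).getD 0 := by
        rw [pvLookup_eq_double b hdb]
        simp only [pvStep, hlr]
        have : ((0 + (2 * n + 1)) % 2 == 1) = true := by simp
        rw [if_pos this]
      have hsa : pvStep (0 + (rest.reverse ++ [b]).length) a = pvDigitVal a := by
        simp only [pvStep, List.length_append, hlr]
        have : ¬ ((0 + (2 * n + 1 + [b].length)) % 2 == 1) := by simp; omega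
        rw [if_neg this]
      rw [hsb, hsa, ih rest hrest hdr]
      -- B's sums unfold: rest is nonempty (odd length), expose its head
      match rest, hrest with
      | r :: rest', _ =>
        simp only [pvEveryOther, List.tail_cons, List.map_cons, List.sum_cons]
        ring

theorem pvGuard_chars (npi : String) (h : PySem.Chars.strIsdigit npi.toList = true) :
    ∀ c ∈ ('8' :: '0' :: '8' :: '4' :: '0' :: npi.toList), PySem.Chars.isdigit c = true := by
  intro c hc
  simp only [PySem.Chars.strIsdigit, Bool.and_eq_true, List.all_eq_true] at h
  simp only [List.mem_cons] at hc
  rcases hc with h8 | h0 | h8' | h4 | h0' | hm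
  · subst h8; decide
  · subst h0; decide
  · subst h8'; decide
  · subst h4; decide
  · subst h0'; decide
  · exact h.2 c hm

-- ===== VERDICT (by name: the statement is the Claim_ definition above) =====
theorem validate_npi_spec : Claim_equal_validate_npi := by
  intro npi _
  unfold Spec_validate_npi validate_npi validate_npi_alt
  by_cases hg : (npi.toList.isEmpty || npi.toList.length != 10 || !(PySem.Chars.strIsdigit npi.toList)) = true
  · rw [if_pos hg, if_pos hg]
  · rw [if_neg hg, if_neg hg]
    simp only [Bool.or_eq_true, Bool.not_eq_true', not_or] at hg
    have hlen : npi.toList.length = 10 := by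
      have := hg.1.2
      simpa using this
    have hdig : PySem.Chars.strIsdigit npi.toList = true := by
      have := hg.2; simpa using this
    have hfull : (['8', '0', '8', '4', '0'] ++ npi.toList).length = 2 * 7 + 1 := by
      simp [hlen]
    have := pvMain 7 (['8', '0', '8', '4', '0'] ++ npi.toList) hfull
      (by simpa using pvGuard_chars npi hdig)
    simp only [this]
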